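-- pv_equiv track=rewrite | github.com/BytebleCode/CloudModelTrain | scripts/build_datasets.py | _strip_docstring
-- ===== SOURCE A (Python) =====
-- def _strip_docstring(code: str) -> str:
--     """Attempt to remove the docstring from a Python function for training input."""
--     lines = code.split("\n")
--     result = []
--     in_docstring = False
--     docstring_char = None
--     found_docstring = False
--
--     for line in lines:
--         stripped = line.strip()
--         if not found_docstring and not in_docstring:
--             # Handle r""", u""", b""" prefixes and both quote styles
--             check = stripped.lstrip("rRuUbB")
--             if check.startswith('"""') or check.startswith("'''"):
--                 docstring_char = check[:3]
--                 in_docstring = True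
--                 # Single-line docstring: """text""" on one line
--                 rest_after_open = check[3:]
--                 if docstring_char in rest_after_open:
--                     in_docstring = False
--                     found_docstring = True
--                 continue
--             result.append(line)
--         elif in_docstring:
--             if docstring_char and docstring_char in stripped:
--                 in_docstring = False
--                 found_docstring = True
--             continue
--         else:
--             result.append(line)
--
--     return "\n".join(result)
-- ===== SOURCE B (Python) =====
-- def _strip_docstring(code: str) -> str:
--     """Locate the docstring's line span first, then slice it out."""
--     lines = code.split("\n")
--     start = quote = single = None
--     for i, line in enumerate(lines):
--         check = line.strip().lstrip("rRuUbB")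
--         if check.startswith('"""') or check.startswith("'''"):
--             start = i
--             quote = check[:3]
--             single = quote in check[3:]
--             break
--     if start is None:
--         return "\n".join(lines)
--     if single:
--         end = start
--     else:
--         end = len(lines) - 1
--         for k, rest_line in enumerate(lines[start + 1:], start + 1):
--             if quote in rest_line.strip():
--                 end = k
--                 break
--     return "\n".join(lines[:start] + lines[end + 1:])
-- ===== Notes on version B (the rewrite author's own statement) =====
-- stated objective: simpler
-- what changed: Replaces A's four-variable state machine fold over all lines with a locate-then-slice decomposition: find the opening line's index (and whether the docstring closes on it), then find the closing line's index, and join lines[:start] + lines[end+1:].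
import Mathlib
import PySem

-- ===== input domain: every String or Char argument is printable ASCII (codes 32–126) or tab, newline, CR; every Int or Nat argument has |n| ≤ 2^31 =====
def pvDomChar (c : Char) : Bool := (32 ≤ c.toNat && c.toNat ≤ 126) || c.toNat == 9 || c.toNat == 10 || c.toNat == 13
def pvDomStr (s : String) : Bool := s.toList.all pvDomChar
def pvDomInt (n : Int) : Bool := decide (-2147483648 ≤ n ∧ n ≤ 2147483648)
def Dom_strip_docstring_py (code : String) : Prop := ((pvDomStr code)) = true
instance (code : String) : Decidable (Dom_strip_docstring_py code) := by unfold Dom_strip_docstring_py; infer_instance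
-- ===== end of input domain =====

-- B replaces A's stateful line-by-line skip loop with a locate-then-slice decomposition (simpler; same cost).


-- str.lstrip("rRuUbB"): drop leading chars of that set — exact port of Python's lstrip with a char set
def pvLstripRB (s : String) : String :=
  String.ofList (s.toList.dropWhile (fun c => c == 'r' || c == 'R' || c == 'u' || c == 'U' || c == 'b' || c == 'B'))

-- ===== PORT A =====
-- loop state: (result, in_docstring, docstring_char, found_docstring)
def pvStepA (st : List String × Bool × Option String × Bool) (line : String) :
    List String × Bool × Option String × Bool :=
  let (result, inDoc, q, found) := st
  let stripped := PySem.Str.strip line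
  if !found && !inDoc then
    let check := pvLstripRB stripped
    if PySem.Str.startswith check "\"\"\"" || PySem.Str.startswith check "'''" then
      let dchar := PySem.Str.slice check none (some 3)
      let restAfterOpen := PySem.Str.slice check (some 3) none
      if PySem.Str.isIn dchar restAfterOpen then (result, false, some dchar, true)
      else (result, true, some dchar, false)
    else (result ++ [line], inDoc, q, found)
  else if inDoc then
    match q with
    | some d => if PySem.Str.isIn d stripped then (result, false, q, true) else (result, inDoc, q, found)
    | none => (result, inDoc, q, found)
  else (result ++ [line], inDoc, q, found)

def strip_docstring_py (code : String) : String :=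
  let lines := (PySem.Str.split? code "\n").getD []
  PySem.Str.join "\n" (lines.foldl pvStepA ([], false, none, false)).1

-- ===== PORT B =====
-- first line (with its index) opening a docstring: returns (index, quote, closed-on-same-line)
def pvFindOpen : List String → Nat → Option (Nat × String × Bool)
  | [], _ => none
  | line :: rest, i =>
    let check := pvLstripRB (PySem.Str.strip line)
    if PySem.Str.startswith check "\"\"\"" || PySem.Str.startswith check "'''" then
      some (i, PySem.Str.slice check none (some 3),
            PySem.Str.isIn (PySem.Str.slice check none (some 3)) (PySem.Str.slice check (some 3) none))
    else pvFindOpen rest (i + 1)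

-- first index ≥ k (over the given suffix) whose stripped line contains the quote, else dflt
def pvFindClose (quote : String) : List String → Nat → Nat → Nat
  | [], _, dflt => dflt
  | line :: rest, k, dflt =>
    if PySem.Str.isIn quote (PySem.Str.strip line) then k else pvFindClose quote rest (k + 1) dflt

def strip_docstring_py_alt (code : String) : String :=
  let lines := (PySem.Str.split? code "\n").getD []
  match pvFindOpen lines 0 with
  | none => PySem.Str.join "\n" lines
  | some (start, quote, single) =>
    let e := if single then start
             else pvFindClose quote (lines.drop (start + 1)) (start + 1) (lines.length - 1)
    PySem.Str.join "\n" (lines.take start ++ lines.drop (e + 1))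

-- ===== PRECONDITION & SPEC =====
def Spec_strip_docstring_py (code : String) (out : String) : Prop := out = strip_docstring_py_alt code
instance (code : String) (out : String) : Decidable (Spec_strip_docstring_py code out) := by unfold Spec_strip_docstring_py; infer_instance

-- ===== CLAIM (what is proved, stated in full; the proofs are below) =====
def Claim_equal_strip_docstring_py : Prop := ∀ (code : String), Dom_strip_docstring_py code → Spec_strip_docstring_py code (strip_docstring_py code)

-- ===== LEMMAS AND PROOFS =====

-- proof-side abbreviations for the per-line tests both ports perform
def pvCheck (line : String) : String := pvLstripRB (PySem.Str.strip line)
def pvIsOpen (line : String) : Bool :=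
  PySem.Str.startswith (pvCheck line) "\"\"\"" || PySem.Str.startswith (pvCheck line) "'''"
def pvQuote (line : String) : String := PySem.Str.slice (pvCheck line) none (some 3)
def pvSingle (line : String) : Bool :=
  PySem.Str.isIn (pvQuote line) (PySem.Str.slice (pvCheck line) (some 3) none)
def pvCloses (d line : String) : Bool := PySem.Str.isIn d (PySem.Str.strip line)

-- what remains after the in-docstring scan: everything after the first closing line (or nothing)
def pvCloseTail (d : String) : List String → List String
  | [] => []
  | l :: t => if pvCloses d l then t else pvCloseTail d t

-- the intended result lines, defined structurally
def pvAltCore : List String → List String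
  | [] => []
  | l :: t =>
    if pvIsOpen l then (if pvSingle l then t else pvCloseTail (pvQuote l) t)
    else l :: pvAltCore t

-- characterizations of one step / one unfolding, stated with the pv* abbreviations
theorem pvStepA_found (res : List String) (q : Option String) (l : String) :
    pvStepA (res, false, q, true) l = (res ++ [l], false, q, true) := by
  simp [pvStepA]

theorem pvStepA_inDoc (res : List String) (d l : String) :
    pvStepA (res, true, some d, false) l =
      if pvCloses d l then (res, false, some d, true) else (res, true, some d, false) := by
  simp [pvStepA, pvCloses]

theorem pvStepA_phase0 (res : List String) (l : String) :
    pvStepA (res, false, none, false) l =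
      if pvIsOpen l then
        (if pvSingle l then (res, false, some (pvQuote l), true)
         else (res, true, some (pvQuote l), false))
      else (res ++ [l], false, none, false) := by
  simp [pvStepA, pvIsOpen, pvSingle, pvQuote, pvCheck]

theorem pvFindOpen_cons (l : String) (t : List String) (i : Nat) :
    pvFindOpen (l :: t) i =
      if pvIsOpen l then some (i, pvQuote l, pvSingle l) else pvFindOpen t (i + 1) := by
  simp [pvFindOpen, pvIsOpen, pvQuote, pvSingle, pvCheck]

theorem pvFindClose_cons (d l : String) (t : List String) (k dflt : Nat) :
    pvFindClose d (l :: t) k dflt =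
      if pvCloses d l then k else pvFindClose d t (k + 1) dflt := by
  simp [pvFindClose, pvCloses]

theorem pvFoldl_found (ls : List String) (res : List String) (q : Option String) :
    ls.foldl pvStepA (res, false, q, true) = (res ++ ls, false, q, true) := by
  induction ls generalizing res with
  | nil => simp
  | cons l t ih =>
    rw [List.foldl_cons, pvStepA_found]
    simpa using ih (res ++ [l])

theorem pvFoldl_inDoc (ls : List String) (res : List String) (d : String) :
    (ls.foldl pvStepA (res, true, some d, false)).1 = res ++ pvCloseTail d ls := by
  induction ls generalizing res with
  | nil => simp [pvCloseTail]
  | cons l t ih =>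
    rw [List.foldl_cons, pvStepA_inDoc]
    by_cases h : pvCloses d l
    · simp [h, pvCloseTail, pvFoldl_found]
    · have h' : pvCloses d l = false := by simpa using h
      simp [h', pvCloseTail, ih]

theorem pvFoldl_phase0 (ls : List String) (res : List String) :
    (ls.foldl pvStepA (res, false, none, false)).1 = res ++ pvAltCore ls := by
  induction ls generalizing res with
  | nil => simp [pvAltCore]
  | cons l t ih =>
    rw [List.foldl_cons, pvStepA_phase0]
    by_cases hop : pvIsOpen l
    · by_cases hs : pvSingle l
      · simp [hop, hs, pvAltCore, pvFoldl_found]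
      · have hs' : pvSingle l = false := by simpa using hs
        simp [hop, hs', pvAltCore, pvFoldl_inDoc]
    · have hop' : pvIsOpen l = false := by simpa using hop
      simp [hop', pvAltCore, ih]

theorem pvFindClose_tail (d : String) (suf : List String) : ∀ (pre : List String) (dflt : Nat),
    dflt = pre.length + suf.length - 1 →
    (pre ++ suf).drop (pvFindClose d suf pre.length dflt + 1) = pvCloseTail d suf := by
  induction suf with
  | nil =>
    intro pre dflt hd
    simp only [pvFindClose, pvCloseTail, List.append_nil]
    apply List.drop_eq_nil_of_le
    simp at hd
    omega
  | cons l t ih =>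
    intro pre dflt hd
    rw [pvFindClose_cons]
    by_cases h : pvCloses d l
    · simp only [h, if_true, pvCloseTail]
      rw [show pre ++ l :: t = (pre ++ [l]) ++ t by simp,
          show pre.length + 1 = (pre ++ [l]).length by simp]
      simp
    · have h' : pvCloses d l = false := by simpa using h
      simp only [h', Bool.false_eq_true, if_false, pvCloseTail]
      have hlen : pre.length + 1 = (pre ++ [l]).length := by simp
      have := ih (pre ++ [l]) dflt (by simp at hd ⊢; omega)
      rw [hlen, show pre ++ l :: t = (pre ++ [l]) ++ t by simp]
      simpa [h'] using this

theorem pvFindOpen_none (suf : List String) : ∀ (pre : List String),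
    pvFindOpen suf pre.length = none → pvAltCore suf = suf := by
  induction suf with
  | nil => intro pre _; rfl
  | cons l t ih =>
    intro pre h
    rw [pvFindOpen_cons] at h
    by_cases hop : pvIsOpen l
    · simp [hop] at h
    · have hop' : pvIsOpen l = false := by simpa using hop
      simp only [hop', Bool.false_eq_true, if_false] at h
      rw [show pre.length + 1 = (pre ++ [l]).length by simp] at h
      simp only [pvAltCore, hop', Bool.false_eq_true, if_false]
      rw [ih (pre ++ [l]) h]

theorem pvFindOpen_some (suf : List String) : ∀ (pre : List String) (start : Nat) (q : String) (s : Bool),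
    pvFindOpen suf pre.length = some (start, q, s) →
    pre ++ pvAltCore suf =
      (pre ++ suf).take start ++
        (pre ++ suf).drop
          ((if s then start
            else pvFindClose q ((pre ++ suf).drop (start + 1)) (start + 1)
              ((pre ++ suf).length - 1)) + 1) := by
  induction suf with
  | nil => intro pre start q s h; exact absurd h (by simp [pvFindOpen])
  | cons l t ih =>
    intro pre start q s h
    rw [pvFindOpen_cons] at h
    by_cases hop : pvIsOpen l
    · simp only [hop, if_true, Option.some.injEq, Prod.mk.injEq] at h
      obtain ⟨h1, h2, h3⟩ := h
      subst h1; subst h2; subst h3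
      have htake : (pre ++ l :: t).take pre.length = pre := by
        simp
      have hdrop1 : (pre ++ l :: t).drop (pre.length + 1) = t := by
        rw [show pre.length + 1 = (pre ++ [l]).length by simp,
            show pre ++ l :: t = (pre ++ [l]) ++ t by simp]
        simp
      rw [htake, hdrop1]
      simp only [pvAltCore, hop, if_true]
      by_cases hs : pvSingle l
      · simp only [hs, if_true, hdrop1]
      · have hs' : pvSingle l = false := by simpa using hs
        simp only [hs', Bool.false_eq_true, if_false]
        have := pvFindClose_tail (pvQuote l) t (pre ++ [l])
          ((pre ++ l :: t).length - 1) (by simp)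
        rw [show (pre ++ [l]).length = pre.length + 1 by simp,
            show (pre ++ [l]) ++ t = pre ++ l :: t by simp] at this
        rw [this]
    · have hop' : pvIsOpen l = false := by simpa using hop
      simp only [hop', Bool.false_eq_true, if_false] at h
      rw [show pre.length + 1 = (pre ++ [l]).length by simp] at h
      have := ih (pre ++ [l]) start q s h
      rw [show (pre ++ [l]) ++ t = pre ++ l :: t by simp] at this
      simp only [pvAltCore, hop', Bool.false_eq_true, if_false]
      rw [show pre ++ l :: pvAltCore t = (pre ++ [l]) ++ pvAltCore t by simp, this]

theorem pvMain (lines : List String) :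
    PySem.Str.join "\n" (lines.foldl pvStepA ([], false, none, false)).1 =
      (match pvFindOpen lines 0 with
       | none => PySem.Str.join "\n" lines
       | some (start, quote, single) =>
         let e := if single then start
                  else pvFindClose quote (lines.drop (start + 1)) (start + 1) (lines.length - 1)
         PySem.Str.join "\n" (lines.take start ++ lines.drop (e + 1))) := by
  have hA := pvFoldl_phase0 lines []
  simp only [List.nil_append] at hA
  rw [hA]
  cases hfo : pvFindOpen lines 0 with
  | none =>
    rw [pvFindOpen_none lines [] (by simpa using hfo)]
  | some v =>
    obtain ⟨start, quote, single⟩ := v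
    have := pvFindOpen_some lines [] start quote single (by simpa using hfo)
    simp only [List.nil_append] at this
    rw [this]

-- ===== VERDICT (by name: the statement is the Claim_ definition above) =====
theorem strip_docstring_py_spec : Claim_equal_strip_docstring_py := by
  intro code _
  show strip_docstring_py code = strip_docstring_py_alt code
  exact pvMain ((PySem.Str.split? code "\n").getD [])
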